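-- pv_equiv track=rewrite | github.com/ibtissem101/Advent-Of-Code-2025 | 2ndday/day2-part2.py | is_repeating_pattern
-- ===== SOURCE A (Python) =====
-- def is_repeating_pattern(num):
--     """Check if a number is made of a repeating pattern (e.g., 121212 = '12' repeated)"""
--     s = str(num)
--     length = len(s)
--
--     for pattern_len in range(1, length):
--         if length % pattern_len == 0:
--             pattern = s[:pattern_len]
--             if pattern * (length // pattern_len) == s and length // pattern_len >= 2:
--                 return True
--
--     return False
-- ===== SOURCE B (Python) =====
-- def is_repeating_pattern(num):
--     """Check if a number is made of a repeating pattern (e.g., 121212 = '12' repeated)"""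
--     s = str(num)
--     return s in (s + s)[1:-1]
-- ===== Notes on version B (the rewrite author's own statement) =====
-- stated objective: idiomatic
-- what changed: Replaces the explicit loop over divisor pattern lengths with the classic doubled-string test: s is a repetition of a proper block iff s occurs inside (s+s)[1:-1], done by one substring search.
import Mathlib
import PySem

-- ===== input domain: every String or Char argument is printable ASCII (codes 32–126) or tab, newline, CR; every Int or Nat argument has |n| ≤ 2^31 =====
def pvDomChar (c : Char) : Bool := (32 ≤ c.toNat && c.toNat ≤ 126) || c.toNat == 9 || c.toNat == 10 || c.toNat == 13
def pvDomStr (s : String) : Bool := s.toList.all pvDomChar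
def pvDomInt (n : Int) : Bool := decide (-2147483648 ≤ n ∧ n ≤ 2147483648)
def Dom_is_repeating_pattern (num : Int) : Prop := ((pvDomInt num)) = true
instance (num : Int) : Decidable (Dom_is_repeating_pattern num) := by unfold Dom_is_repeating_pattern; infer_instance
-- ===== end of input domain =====

-- B replaces A's divisor-length loop by the classic doubled-string membership test s in (s+s)[1:-1] (idiomatic; not measurably faster).

-- ===== PORT A =====
-- Python string repetition 'pattern * k' (here k = length // pattern_len ≥ 0; exact for k ≥ 0, and Python yields '' for k < 0 just as toNat does)
def pvStrRep (t : List Char) (k : Int) : List Char := (List.replicate k.toNat t).flatten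

-- the 'for pattern_len in range(1, length)' loop with its early 'return True'
def pvALoop (s : List Char) (length : Int) : List Int → Bool
  | [] => false
  | p :: rest =>
    if PySem.Int.mod length p == 0 then
      let pattern := PySem.List.slice s none (some p)
      if pvStrRep pattern (PySem.Int.floordiv length p) == s
          && decide (2 ≤ PySem.Int.floordiv length p) then true
      else pvALoop s length rest
    else pvALoop s length rest

def is_repeating_pattern (num : Int) : Bool :=
  let s := PySem.Int.toChars num
  let length := PySem.List.len s
  pvALoop s length (PySem.List.pyRange 1 length 1)

-- ===== PORT B =====
def is_repeating_pattern_alt (num : Int) : Bool :=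
  let s := PySem.Int.toChars num
  PySem.Chars.isIn s (PySem.List.slice (s ++ s) (some 1) (some (-1)))

-- ===== PRECONDITION & SPEC =====
def Spec_is_repeating_pattern (num : Int) (out : Bool) : Prop := out = is_repeating_pattern_alt num
instance (num : Int) (out : Bool) : Decidable (Spec_is_repeating_pattern num out) := by unfold Spec_is_repeating_pattern; infer_instance

-- ===== CLAIM (what is proved, stated in full; the proofs are below) =====
def Claim_equal_is_repeating_pattern : Prop := ∀ (num : Int), Dom_is_repeating_pattern num → Spec_is_repeating_pattern num (is_repeating_pattern num)

-- ===== LEMMAS AND PROOFS =====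

-- str(num) is never empty
theorem pv_toDigitsCore_ne_nil (b : Nat) : ∀ (f n : Nat) (l : List Char), l ≠ [] → Nat.toDigitsCore b f n l ≠ [] := by
  intro f
  induction f with
  | zero => intro n l hl; simpa [Nat.toDigitsCore] using hl
  | succ f ih =>
      intro n l hl
      simp only [Nat.toDigitsCore]
      split
      · simp
      · exact ih _ _ (by simp)

theorem pv_toChars_ne_nil (num : Int) : PySem.Int.toChars num ≠ [] := by
  unfold PySem.Int.toChars
  split
  · simp
  · show Nat.toDigits 10 num.toNat ≠ []
    unfold Nat.toDigits
    simp only [Nat.toDigitsCore]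
    split
    · simp
    · exact pv_toDigitsCore_ne_nil 10 _ _ _ (by simp)

-- the mathematical repetition predicate
def pvRep (s : List Char) (p : Nat) : Prop :=
  0 < p ∧ p < s.length ∧ p ∣ s.length ∧ (List.replicate (s.length / p) (s.take p)).flatten = s

-- flatten of replicate commutes with one more copy
theorem pv_flatten_replicate_comm {α : Type} (t : List α) (k : Nat) :
    (List.replicate k t).flatten ++ t = t ++ (List.replicate k t).flatten := by
  induction k with
  | zero => simp
  | succ k ih => simp [List.replicate_succ, List.flatten_cons, List.append_assoc, ih]

theorem pv_getElem_flatten_replicate {α : Type} (t : List α) (k i : Nat)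
    (ht : 0 < t.length) (hi : i < k * t.length) :
    ((List.replicate k t).flatten)[i]'(by simpa [Nat.mul_comm] using hi) = t[i % t.length]'(Nat.mod_lt _ ht) := by
  induction k generalizing i with
  | zero => omega
  | succ k ih =>
      simp only [List.replicate_succ, List.flatten_cons]
      by_cases hcase : i < t.length
      · rw [List.getElem_append_left hcase]
        congr 1
        exact (Nat.mod_eq_of_lt hcase).symm
      · push Not at hcase
        rw [List.getElem_append_right hcase]
        have hi' : i - t.length < k * t.length := by
          have : (k+1) * t.length = k * t.length + t.length := by ring
          omega
        rw [ih (i - t.length) hi']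
        congr 1
        conv_rhs => rw [show i = (i - t.length) + t.length by omega]
        rw [Nat.add_mod_right]

-- a p-periodic list of length a multiple of p is the flatten of replicates of its p-prefix
theorem pv_periodic_flatten (s : List Char) (p : Nat) (hp : 0 < p) (hd : p ∣ s.length)
    (hper : ∀ i (h : i + p < s.length), s[i + p] = s[i]'(by omega)) :
    (List.replicate (s.length / p) (s.take p)).flatten = s := by
  rcases Nat.eq_zero_or_pos s.length with h0 | hn
  · have hnil : s = [] := List.eq_nil_of_length_eq_zero h0
    subst hnil
    simp
  · have hpn : p ≤ s.length := Nat.le_of_dvd hn hd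
    have ht : (s.take p).length = p := by
      simp [List.length_take]
      omega
    have hflat : ((List.replicate (s.length / p) (s.take p)).flatten).length = s.length := by
      simp [ht, Nat.div_mul_cancel hd]
    have key : ∀ i (hi : i < s.length),
        s[i]'hi = s[i % p]'(by have := Nat.mod_lt i hp; omega) := by
      intro i
      induction i using Nat.strong_induction_on with
      | _ i ih =>
        intro hi
        by_cases hip : i < p
        · have : i % p = i := Nat.mod_eq_of_lt hip
          simp only [this]
        · have h2 : (i - p) + p < s.length := by omega
          have e1 := hper (i - p) h2
          have e2 : (i - p) + p = i := by omega
          simp only [e2] at e1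
          rw [e1, ih (i - p) (by omega) (by omega)]
          have e3 : (i - p) % p = i % p := by
            conv_rhs => rw [← e2]
            rw [Nat.add_mod_right]
          simp only [e3]
    apply List.ext_getElem hflat
    intro i h1 h2
    have hi' : i < (s.length / p) * (s.take p).length := by
      rw [ht]
      rw [Nat.div_mul_cancel hd]
      exact h2
    rw [pv_getElem_flatten_replicate (s.take p) (s.length / p) i (by omega) hi']
    rw [key i h2]
    have hmod : i % (s.take p).length = i % p := by rw [ht]
    simp only [hmod, List.getElem_take]

-- rotate as an iterate of rotate 1
theorem pv_rotate_iterate (l : List Char) (k : Nat) :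
    (fun l : List Char => l.rotate 1)^[k] l = l.rotate k := by
  induction k with
  | zero => simp
  | succ k ih => rw [Function.iterate_succ_apply', ih, List.rotate_rotate]

-- a nontrivial rotation fixing s yields a proper-divisor period
theorem pv_rotate_to_rep (s : List Char) (j : Nat) (h1 : 1 ≤ j) (h2 : j < s.length)
    (hrot : s.rotate j = s) : ∃ p, pvRep s p := by
  have hper : Function.IsPeriodicPt (fun l : List Char => l.rotate 1) j s := by
    show (fun l : List Char => l.rotate 1)^[j] s = s
    rw [pv_rotate_iterate]
    exact hrot
  have hlenper : Function.IsPeriodicPt (fun l : List Char => l.rotate 1) s.length s := by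
    show (fun l : List Char => l.rotate 1)^[s.length] s = s
    rw [pv_rotate_iterate]
    exact List.rotate_length s
  set m := Function.minimalPeriod (fun l : List Char => l.rotate 1) s with hm
  have hmpos : 0 < m := hper.minimalPeriod_pos (by omega)
  have hmj : m ∣ j := hper.minimalPeriod_dvd
  have hmn : m ∣ s.length := hlenper.minimalPeriod_dvd
  have hmlt : m < s.length := lt_of_le_of_lt (Nat.le_of_dvd (by omega) hmj) h2
  have hrotm : s.rotate m = s := by
    have := Function.isPeriodicPt_minimalPeriod (fun l : List Char => l.rotate 1) s
    rw [show Function.IsPeriodicPt (fun l : List Char => l.rotate 1) m s =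
        ((fun l : List Char => l.rotate 1)^[m] s = s) from rfl, pv_rotate_iterate] at this
    exact this
  refine ⟨m, hmpos, hmlt, hmn, pv_periodic_flatten s m hmpos hmn ?_⟩
  intro i hi
  have hgr := List.getElem_rotate s m i (by rw [List.length_rotate]; omega)
  simp only [hrotm, Nat.mod_eq_of_lt hi] at hgr
  exact hgr.symm

-- a proper-divisor repetition yields a nontrivial fixing rotation
theorem pv_rep_to_rotate (s : List Char) (p : Nat) (h : pvRep s p) :
    s.rotate p = s := by
  obtain ⟨hp, hlt, hd, hflat⟩ := h
  have hpn : p ≤ s.length := le_of_lt hlt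
  set t := s.take p with htdef
  have ht : t.length = p := by
    simp [htdef, List.length_take]
    omega
  have hk : 1 ≤ s.length / p := Nat.one_le_div_iff hp |>.mpr hpn
  have hsplit : s = t ++ (List.replicate (s.length / p - 1) t).flatten := by
    conv_lhs => rw [← hflat, show s.length / p = (s.length / p - 1) + 1 by omega]
    rw [List.replicate_succ, List.flatten_cons]
  have hdrop : s.drop p = (List.replicate (s.length / p - 1) t).flatten := by
    conv_lhs => rw [hsplit, ← ht]
    rw [List.drop_left, ht]
  have htake : s.take p = t := htdef.symm
  rw [List.rotate_eq_drop_append_take hpn, hdrop, htake, pv_flatten_replicate_comm]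
  exact hsplit.symm

-- B's membership test, characterized by rotations
theorem pv_b_iff (s : List Char) (hs : s ≠ []) :
    PySem.Chars.isIn s (PySem.List.slice (s ++ s) (some 1) (some (-1))) = true ↔
      ∃ j, 1 ≤ j ∧ j < s.length ∧ s.rotate j = s := by
  have hn : 1 ≤ s.length := List.length_pos_iff.mpr hs
  have hslice : PySem.List.slice (s ++ s) (some 1) (some (-1)) =
      List.take (2 * s.length - 2) (List.drop 1 (s ++ s)) := by
    simp only [PySem.List.slice, PySem.List.clampIdx]
    norm_num
    rw [if_neg (by omega), min_eq_left (by omega), List.drop_one]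
    congr 1
    omega
  rw [hslice, ← PySem.Chars.exists_prefix_drop_iff_isIn]
  have hkey : ∀ i, i ≤ s.length → (s <+: (s ++ s).drop i ↔ s.rotate i = s) := by
    intro i hi
    have hda : (s ++ s).drop i = s.drop i ++ s := by
      rw [List.drop_append, Nat.sub_eq_zero_of_le hi, List.drop_zero]
    rw [List.prefix_iff_eq_take, hda, List.take_append, List.length_drop]
    rw [List.take_of_length_le (by rw [List.length_drop]; omega)]
    rw [show s.length - (s.length - i) = i by omega]
    rw [List.rotate_eq_drop_append_take hi]
    exact eq_comm
  constructor
  · rintro ⟨j, hj⟩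
    rw [List.drop_take, List.drop_drop] at hj
    rw [List.prefix_take_iff] at hj
    obtain ⟨hpre, hlen⟩ := hj
    have hjn : 1 + j ≤ s.length := by omega
    refine ⟨1 + j, by omega, by omega, ?_⟩
    · exact (hkey (1 + j) hjn).mp hpre
  · rintro ⟨i, hi1, hi2, hrot⟩
    refine ⟨i - 1, ?_⟩
    rw [List.drop_take, List.drop_drop, List.prefix_take_iff]
    rw [show 1 + (i - 1) = i by omega]
    exact ⟨(hkey i (by omega)).mpr hrot, by omega⟩

-- A's loop, characterized as an existential over the scanned range
theorem pv_aLoop_iff (s : List Char) (length : Int) (ps : List Int) :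
    pvALoop s length ps = true ↔
      ∃ p ∈ ps, PySem.Int.mod length p = 0 ∧
        (pvStrRep (PySem.List.slice s none (some p)) (PySem.Int.floordiv length p) = s ∧
          2 ≤ PySem.Int.floordiv length p) := by
  induction ps with
  | nil => simp [pvALoop]
  | cons p rest ih =>
      simp only [pvALoop]
      split_ifs with h1 h2
      · simp_all
      · simp_all
      · simp only [ih]
        constructor
        · rintro ⟨q, hq, h⟩; exact ⟨q, List.mem_cons_of_mem _ hq, h⟩
        · rintro ⟨q, hq, h⟩
          rcases List.mem_cons.mp hq with rfl | hq
          · exact absurd h.1 (by simpa using h1)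
          · exact ⟨q, hq, h⟩

-- A's result over the Int range equals the Nat-level predicate
theorem pv_a_iff (s : List Char) (_hs : s ≠ []) :
    pvALoop s (PySem.List.len s) (PySem.List.pyRange 1 (PySem.List.len s) 1) = true ↔
      ∃ p, pvRep s p := by
  rw [pv_aLoop_iff]
  simp only [PySem.List.len_eq]
  constructor
  · rintro ⟨p, hmem, hmod, hrepeq, hk2⟩
    rw [PySem.List.mem_pyRange_one] at hmem
    obtain ⟨hp1, hp2⟩ := hmem
    obtain ⟨q, rfl⟩ : ∃ q : Nat, p = (q : Int) := ⟨p.toNat, (Int.toNat_of_nonneg (by omega)).symm⟩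
    refine ⟨q, by omega, by omega, ?_, ?_⟩
    · rw [PySem.Int.mod_eq_zero_iff_dvd] at hmod
      exact_mod_cast hmod
    · rw [PySem.Int.floordiv_natCast] at hrepeq
      simpa [pvStrRep, PySem.List.slice_to_natCast] using hrepeq
  · rintro ⟨q, hq1, hq2, hdvd, hflat⟩
    refine ⟨(q : Int), ?_, ?_, ?_, ?_⟩
    · rw [PySem.List.mem_pyRange_one]
      constructor
      · exact_mod_cast hq1
      · exact_mod_cast hq2
    · rw [PySem.Int.mod_eq_zero_iff_dvd]
      exact_mod_cast hdvd
    · rw [PySem.Int.floordiv_natCast]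
      simpa [pvStrRep, PySem.List.slice_to_natCast] using hflat
    · rw [PySem.Int.floordiv_natCast]
      have hk : 2 ≤ s.length / q := by
        have := Nat.div_mul_cancel hdvd
        rcases Nat.lt_or_ge (s.length / q) 2 with h | h
        · interval_cases h' : s.length / q <;> omega
        · exact h
      exact_mod_cast hk

-- ===== VERDICT (by name: the statement is the Claim_ definition above) =====
theorem is_repeating_pattern_spec : Claim_equal_is_repeating_pattern := by
  intro num _
  unfold Spec_is_repeating_pattern
  show is_repeating_pattern num = is_repeating_pattern_alt num
  simp only [is_repeating_pattern, is_repeating_pattern_alt]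
  have hs : PySem.Int.toChars num ≠ [] := pv_toChars_ne_nil num
  rw [Bool.eq_iff_iff, pv_a_iff _ hs, pv_b_iff _ hs]
  constructor
  · rintro ⟨p, hrep⟩
    exact ⟨p, hrep.1, hrep.2.1, pv_rep_to_rotate _ p hrep⟩
  · rintro ⟨j, hj1, hj2, hrot⟩
    exact pv_rotate_to_rep _ j hj1 hj2 hrot
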